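-- pv_equiv track=rewrite | github.com/MrMiM-tfe/flow-fields | helpers.py | get_line_pixels_with_thickness
-- ===== SOURCE A (Python) =====
-- def get_line_pixels_with_thickness(x1, y1, x2, y2, thickness):
--     pixels = []
--
--     dx = abs(x2 - x1)
--     dy = abs(y2 - y1)
--     sx = 1 if x1 < x2 else -1
--     sy = 1 if y1 < y2 else -1
--     err = dx - dy
--
--     while (x1, y1) != (x2, y2):
--         # Add the original pixel
--         pixels.append((x1, y1))
--
--         # Add pixels in a neighborhood around the original pixel
--         for i in range(1, thickness + 1):
--             for j in range(1, thickness + 1):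
--                 pixels.append((x1 + i, y1 + j))
--                 pixels.append((x1 + i, y1 - j))
--                 pixels.append((x1 - i, y1 + j))
--                 pixels.append((x1 - i, y1 - j))
--
--         e2 = 2 * err
--         if e2 > -dy:
--             err -= dy
--             x1 += sx
--         if e2 < dx:
--             err += dx
--             y1 += sy
--
--     return pixels
-- ===== SOURCE B (Python) =====
-- def get_line_pixels_with_thickness(x1, y1, x2, y2, thickness):
--     # Closed form: the k-th Bresenham point is computed directly by an integer
--     # division along the driving axis -- no error accumulator, no while loop.
--     dx = abs(x2 - x1)
--     dy = abs(y2 - y1)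
--     sx = 1 if x1 < x2 else -1
--     sy = 1 if y1 < y2 else -1
--     pixels = []
--     for k in range(max(dx, dy)):
--         if dx >= dy:
--             px = x1 + sx * k
--             py = y1 + sy * ((2 * k * dy + dx - 1) // (2 * dx))
--         else:
--             px = x1 + sx * ((2 * k * dx + dy - 1) // (2 * dy))
--             py = y1 + sy * k
--         pixels.append((px, py))
--         for i in range(1, thickness + 1):
--             for j in range(1, thickness + 1):
--                 pixels.append((px + i, py + j))
--                 pixels.append((px + i, py - j))
--                 pixels.append((px - i, py + j))
--                 pixels.append((px - i, py - j))
--     return pixels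
-- ===== Notes on version B (the rewrite author's own statement) =====
-- stated objective: alternative
-- what changed: Replaces the incremental error-accumulator Bresenham while-loop by a direct closed-form computation: the k-th base pixel is obtained by an integer division along the driving axis (y = y1 + sy*((2*k*dy+dx-1)//(2*dx)) when dx>=dy, symmetrically otherwise) in a for-loop over range(max(dx,dy)), with no err/e2 state at all.
import Mathlib
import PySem

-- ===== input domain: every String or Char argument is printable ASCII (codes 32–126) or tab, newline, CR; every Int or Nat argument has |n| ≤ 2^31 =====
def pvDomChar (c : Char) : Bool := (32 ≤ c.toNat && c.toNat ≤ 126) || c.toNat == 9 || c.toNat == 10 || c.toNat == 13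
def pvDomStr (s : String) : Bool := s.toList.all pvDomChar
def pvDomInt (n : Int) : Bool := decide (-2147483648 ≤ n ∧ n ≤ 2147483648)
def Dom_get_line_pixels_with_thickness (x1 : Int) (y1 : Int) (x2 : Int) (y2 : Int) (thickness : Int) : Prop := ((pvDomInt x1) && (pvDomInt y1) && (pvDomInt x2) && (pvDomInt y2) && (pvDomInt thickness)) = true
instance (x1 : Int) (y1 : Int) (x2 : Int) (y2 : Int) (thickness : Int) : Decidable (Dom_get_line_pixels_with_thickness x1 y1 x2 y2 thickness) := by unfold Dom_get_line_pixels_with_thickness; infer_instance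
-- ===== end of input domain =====

-- B replaces A's error-accumulator Bresenham while-loop by a closed-form for-loop:
-- the k-th base pixel is computed directly by an integer division along the driving
-- axis; the output (order included) is identical.

-- ===== PORT A =====
-- inner double 'for' over range(1, thickness+1) appending the 4 neighbors
def pvNbA (x y : Int) (L : List Int) (acc : List (Int × Int)) : List (Int × Int) :=
  L.foldl (fun a i =>
    L.foldl (fun a j =>
      a ++ [(x + i, y + j), (x + i, y - j), (x - i, y + j), (x - i, y - j)]) a) acc

-- the 'while (x1, y1) != (x2, y2)' loop, with fuel exceeding its iteration count
def pvLoopA (x2 y2 dx dy sx sy : Int) (L : List Int) :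
    Nat → Int → Int → Int → List (Int × Int) → List (Int × Int)
  | 0, _, _, _, acc => acc
  | Nat.succ f, x1, y1, err, acc =>
    if (x1, y1) = (x2, y2) then acc
    else
      let acc := pvNbA x1 y1 L (acc ++ [(x1, y1)])
      let e2 := 2 * err
      let err' := if e2 > -dy then err - dy else err
      let x1' := if e2 > -dy then x1 + sx else x1
      let err'' := if e2 < dx then err' + dx else err'
      let y1' := if e2 < dx then y1 + sy else y1
      pvLoopA x2 y2 dx dy sx sy L f x1' y1' err'' acc

def get_line_pixels_with_thickness (x1 : Int) (y1 : Int) (x2 : Int) (y2 : Int) (thickness : Int) : List (Int × Int) :=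
  let dx := |x2 - x1|
  let dy := |y2 - y1|
  let sx : Int := if x1 < x2 then 1 else -1
  let sy : Int := if y1 < y2 then 1 else -1
  let err := dx - dy
  pvLoopA x2 y2 dx dy sx sy (PySem.List.pyRange 1 (thickness + 1) 1)
    ((dx + dy).toNat + 1) x1 y1 err []

-- ===== PORT B =====
-- B's inner thickening loops are the same nested 'for' shape as A's (as in Source B);
-- both ports share the transliteration pvNbA of that double loop.
def get_line_pixels_with_thickness_alt (x1 : Int) (y1 : Int) (x2 : Int) (y2 : Int) (thickness : Int) : List (Int × Int) :=
  let dx := |x2 - x1|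
  let dy := |y2 - y1|
  let sx : Int := if x1 < x2 then 1 else -1
  let sy : Int := if y1 < y2 then 1 else -1
  let L := PySem.List.pyRange 1 (thickness + 1) 1
  (PySem.List.pyRange 0 (max dx dy) 1).foldl (fun acc k =>
    let p : Int × Int :=
      if dx ≥ dy then
        (x1 + sx * k, y1 + sy * PySem.Int.floordiv (2 * k * dy + dx - 1) (2 * dx))
      else
        (x1 + sx * PySem.Int.floordiv (2 * k * dx + dy - 1) (2 * dy), y1 + sy * k)
    pvNbA p.1 p.2 L (acc ++ [p])) []

-- ===== PRECONDITION & SPEC =====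
def Spec_get_line_pixels_with_thickness (x1 : Int) (y1 : Int) (x2 : Int) (y2 : Int) (thickness : Int) (out : List (Int × Int)) : Prop := out = get_line_pixels_with_thickness_alt x1 y1 x2 y2 thickness
instance (x1 : Int) (y1 : Int) (x2 : Int) (y2 : Int) (thickness : Int) (out : List (Int × Int)) : Decidable (Spec_get_line_pixels_with_thickness x1 y1 x2 y2 thickness out) := by unfold Spec_get_line_pixels_with_thickness; infer_instance

-- ===== CLAIM =====
def Claim_equal_get_line_pixels_with_thickness : Prop := ∀ (x1 : Int) (y1 : Int) (x2 : Int) (y2 : Int) (thickness : Int), Dom_get_line_pixels_with_thickness x1 y1 x2 y2 thickness → Spec_get_line_pixels_with_thickness x1 y1 x2 y2 thickness (get_line_pixels_with_thickness x1 y1 x2 y2 thickness)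

-- ===== LEMMAS AND PROOFS =====

-- the 4-neighbor block of one base pixel, as a flat list
def pvNbhd (L : List Int) (x y : Int) : List (Int × Int) :=
  L.flatMap (fun i => L.flatMap (fun j =>
    [(x + i, y + j), (x + i, y - j), (x - i, y + j), (x - i, y - j)]))

def pvBlk (L : List Int) (p : Int × Int) : List (Int × Int) := p :: pvNbhd L p.1 p.2

lemma pvNb_gen (L M : List Int) (g : Int → Int → List (Int × Int)) (acc : List (Int × Int)) :
    M.foldl (fun a i => L.foldl (fun a j => a ++ g i j) a) acc
    = acc ++ M.flatMap (fun i => L.flatMap (g i)) := by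
  induction M generalizing acc with
  | nil => simp
  | cons i M ih =>
    simp only [List.foldl_cons]
    rw [PySem.List.foldl_append_eq_flatMap, ih]
    simp

lemma pvNbA_eq (x y : Int) (L : List Int) (acc : List (Int × Int)) :
    pvNbA x y L acc = acc ++ pvNbhd L x y := pvNb_gen L L _ acc

-- floor-division characterization helper
lemma pvFd_eq (a b q : Int) (hb : 0 < b) (h1 : q * b ≤ a) (h2 : a < (q + 1) * b) :
    PySem.Int.floordiv a b = q :=
  (PySem.Int.floordiv_eq_iff_of_pos hb).mpr ⟨h1, h2⟩

-- the closed-form minor coordinate in the dx ≥ dy branch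
lemma pvQ_last (dx dy : Int) (hdx : 0 < dx) (hdy : 0 ≤ dy) :
    PySem.Int.floordiv (2 * dx * dy + dx - 1) (2 * dx) = dy := by
  apply pvFd_eq _ _ _ (by omega)
  · nlinarith
  · nlinarith

-- the closed-form minor coordinate in the dy > dx branch
lemma pvP_last (dx dy : Int) (hdy : 0 < dy) (hdx : 0 ≤ dx) :
    PySem.Int.floordiv (2 * dy * dx + dy - 1) (2 * dy) = dx := by
  apply pvFd_eq _ _ _ (by omega)
  · nlinarith
  · nlinarith

-- main loop lemma, driving axis x (dx ≥ dy, dx > 0)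
lemma pvLoopA_dx (x1 y1 dx dy sx sy : Int) (L : List Int)
    (hdx : 0 < dx) (hdy : 0 ≤ dy) (hle : dy ≤ dx) (hsx : sx = 1 ∨ sx = -1) :
    ∀ (f : Nat) (k : Int), 0 ≤ k → k ≤ dx → (dx - k).toNat < f → ∀ acc,
    pvLoopA (x1 + sx * dx) (y1 + sy * dy) dx dy sx sy L f
      (x1 + sx * k) (y1 + sy * PySem.Int.floordiv (2 * k * dy + dx - 1) (2 * dx))
      (dx - dy - k * dy + PySem.Int.floordiv (2 * k * dy + dx - 1) (2 * dx) * dx) acc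
    = acc ++ (PySem.List.pyRange k dx 1).flatMap
        (fun m => pvBlk L (x1 + sx * m, y1 + sy * PySem.Int.floordiv (2 * m * dy + dx - 1) (2 * dx))) := by
  intro f
  induction f with
  | zero => intro k _ _ hf _; exact absurd hf (by omega)
  | succ f ih =>
    intro k hk0 hkdx hf acc
    by_cases hk : k = dx
    · rw [hk, pvQ_last dx dy hdx hdy]
      simp only [pvLoopA]
      rw [PySem.List.pyRange_one_eq_nil (le_refl dx)]
      simp
    · have hklt : k < dx := lt_of_le_of_ne hkdx hk
      set q := PySem.Int.floordiv (2 * k * dy + dx - 1) (2 * dx) with hqdef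
      obtain ⟨hq1, hq2⟩ := (PySem.Int.floordiv_eq_iff_of_pos (by omega : (0:Int) < 2 * dx)).mp hqdef.symm
      have hne : ((x1 + sx * k, y1 + sy * q) : Int × Int) ≠ (x1 + sx * dx, y1 + sy * dy) := by
        intro h
        have h1 : x1 + sx * k = x1 + sx * dx := congrArg Prod.fst h
        rcases hsx with h' | h' <;> subst h' <;> omega
      simp only [pvLoopA, if_neg hne]
      rw [pvNbA_eq]
      have e2x : 2 * (dx - dy - k * dy + q * dx) > -dy := by
        by_cases hd : dy = dx
        · have hqk : q = k := by
            have hge : k ≤ q := by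
              by_contra hc
              push_neg at hc
              nlinarith [mul_nonneg (by omega : (0:Int) ≤ k - 1 - q) (by omega : (0:Int) ≤ 2 * dx)]
            have hle2 : q ≤ k := by
              by_contra hc
              push_neg at hc
              nlinarith [mul_nonneg (by omega : (0:Int) ≤ q - 1 - k) (by omega : (0:Int) ≤ 2 * dx)]
            omega
          subst hd
          rw [hqk]
          nlinarith
        · have hlt2 : dy < dx := lt_of_le_of_ne hle hd
          nlinarith
      rw [if_pos e2x, if_pos e2x]
      by_cases hym : 2 * (dx - dy - k * dy + q * dx) < dx
      · rw [if_pos hym, if_pos hym]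
        have hq' : PySem.Int.floordiv (2 * (k + 1) * dy + dx - 1) (2 * dx) = q + 1 := by
          apply pvFd_eq _ _ _ (by omega)
          · nlinarith
          · nlinarith
        have hx' : x1 + sx * k + sx = x1 + sx * (k + 1) := by ring
        have herr : dx - dy - k * dy + q * dx - dy + dx
            = dx - dy - (k + 1) * dy + (q + 1) * dx := by ring
        have hy' : y1 + sy * q + sy = y1 + sy * (q + 1) := by ring
        have ih' := ih (k + 1) (by omega) (by omega) (by omega)
        rw [hq'] at ih'
        rw [hx', herr, hy', ih']
        rw [PySem.List.pyRange_one_cons hklt]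
        simp [pvBlk, hqdef]
      · rw [if_neg hym, if_neg hym]
        push_neg at hym
        have hq' : PySem.Int.floordiv (2 * (k + 1) * dy + dx - 1) (2 * dx) = q := by
          apply pvFd_eq _ _ _ (by omega)
          · nlinarith
          · nlinarith
        have herr : dx - dy - k * dy + q * dx - dy
            = dx - dy - (k + 1) * dy + q * dx := by ring
        have hx' : x1 + sx * k + sx = x1 + sx * (k + 1) := by ring
        have ih' := ih (k + 1) (by omega) (by omega) (by omega)
        rw [hq'] at ih'
        rw [herr, hx', ih']
        rw [PySem.List.pyRange_one_cons hklt]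
        simp [pvBlk, hqdef]

-- main loop lemma, driving axis y (dy > dx)
lemma pvLoopA_dy (x1 y1 dx dy sx sy : Int) (L : List Int)
    (hdy : 0 < dy) (hdx : 0 ≤ dx) (hlt : dx < dy) (hsy : sy = 1 ∨ sy = -1) :
    ∀ (f : Nat) (k : Int), 0 ≤ k → k ≤ dy → (dy - k).toNat < f → ∀ acc,
    pvLoopA (x1 + sx * dx) (y1 + sy * dy) dx dy sx sy L f
      (x1 + sx * PySem.Int.floordiv (2 * k * dx + dy - 1) (2 * dy)) (y1 + sy * k)
      (dx - dy - PySem.Int.floordiv (2 * k * dx + dy - 1) (2 * dy) * dy + k * dx) acc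
    = acc ++ (PySem.List.pyRange k dy 1).flatMap
        (fun m => pvBlk L (x1 + sx * PySem.Int.floordiv (2 * m * dx + dy - 1) (2 * dy), y1 + sy * m)) := by
  intro f
  induction f with
  | zero => intro k _ _ hf _; exact absurd hf (by omega)
  | succ f ih =>
    intro k hk0 hkdy hf acc
    by_cases hk : k = dy
    · rw [hk, pvP_last dx dy hdy hdx]
      simp only [pvLoopA]
      rw [PySem.List.pyRange_one_eq_nil (le_refl dy)]
      simp
    · have hklt : k < dy := lt_of_le_of_ne hkdy hk
      set p := PySem.Int.floordiv (2 * k * dx + dy - 1) (2 * dy) with hpdef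
      obtain ⟨hp1, hp2⟩ := (PySem.Int.floordiv_eq_iff_of_pos (by omega : (0:Int) < 2 * dy)).mp hpdef.symm
      have hne : ((x1 + sx * p, y1 + sy * k) : Int × Int) ≠ (x1 + sx * dx, y1 + sy * dy) := by
        intro h
        have h1 : y1 + sy * k = y1 + sy * dy := congrArg Prod.snd h
        rcases hsy with h' | h' <;> subst h' <;> omega
      simp only [pvLoopA, if_neg hne]
      rw [pvNbA_eq]
      have e2y : 2 * (dx - dy - p * dy + k * dx) < dx := by nlinarith
      rw [if_pos e2y, if_pos e2y]
      by_cases hxm : 2 * (dx - dy - p * dy + k * dx) > -dy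
      · rw [if_pos hxm, if_pos hxm]
        have hp' : PySem.Int.floordiv (2 * (k + 1) * dx + dy - 1) (2 * dy) = p + 1 := by
          apply pvFd_eq _ _ _ (by omega)
          · nlinarith
          · nlinarith
        have hy' : y1 + sy * k + sy = y1 + sy * (k + 1) := by ring
        have herr : dx - dy - p * dy + k * dx - dy + dx
            = dx - dy - (p + 1) * dy + (k + 1) * dx := by ring
        have hx' : x1 + sx * p + sx = x1 + sx * (p + 1) := by ring
        have ih' := ih (k + 1) (by omega) (by omega) (by omega)
        rw [hp'] at ih'
        rw [hy', herr, hx', ih']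
        rw [PySem.List.pyRange_one_cons hklt]
        simp [pvBlk, hpdef]
      · rw [if_neg hxm, if_neg hxm]
        push_neg at hxm
        have hp' : PySem.Int.floordiv (2 * (k + 1) * dx + dy - 1) (2 * dy) = p := by
          apply pvFd_eq _ _ _ (by omega)
          · nlinarith
          · nlinarith
        have hy' : y1 + sy * k + sy = y1 + sy * (k + 1) := by ring
        have herr : dx - dy - p * dy + k * dx + dx
            = dx - dy - p * dy + (k + 1) * dx := by ring
        have ih' := ih (k + 1) (by omega) (by omega) (by omega)
        rw [hp'] at ih'
        rw [hy', herr, ih']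
        rw [PySem.List.pyRange_one_cons hklt]
        simp [pvBlk, hpdef]

-- B's outer foldl in component form, as a flatMap of blocks
lemma pvFoldB_eq' (L : List Int) (F G : Int → Int) (l : List Int) (acc : List (Int × Int)) :
    l.foldl (fun acc k => pvNbA (F k) (G k) L (acc ++ [(F k, G k)])) acc
    = acc ++ l.flatMap (fun k => pvBlk L (F k, G k)) := by
  induction l generalizing acc with
  | nil => simp
  | cons k l ih =>
    simp only [List.foldl_cons]
    rw [pvNbA_eq, ih]
    simp [pvBlk]

lemma pvFd_zero (d e : Int) (hd : 0 < d) :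
    PySem.Int.floordiv (2 * 0 * e + d - 1) (2 * d) = 0 := by
  apply pvFd_eq _ _ _ (by omega) <;> nlinarith

-- ===== VERDICT =====
theorem get_line_pixels_with_thickness_spec : Claim_equal_get_line_pixels_with_thickness := by
  intro x1 y1 x2 y2 t _
  unfold Spec_get_line_pixels_with_thickness
  simp only [get_line_pixels_with_thickness, get_line_pixels_with_thickness_alt]
  set dx := |x2 - x1| with hdxdef
  set dy := |y2 - y1| with hdydef
  set sx : Int := if x1 < x2 then 1 else -1 with hsxdef
  set sy : Int := if y1 < y2 then 1 else -1 with hsydef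
  have hdx0 : 0 ≤ dx := abs_nonneg _
  have hdy0 : 0 ≤ dy := abs_nonneg _
  have hsx : sx = 1 ∨ sx = -1 := by
    rw [hsxdef]; split <;> simp
  have hsy : sy = 1 ∨ sy = -1 := by
    rw [hsydef]; split <;> simp
  have hx2 : x2 = x1 + sx * dx := by
    rw [hsxdef, hdxdef]
    by_cases h : x1 < x2
    · rw [if_pos h, abs_of_nonneg (by omega : (0:Int) ≤ x2 - x1)]; ring
    · rw [if_neg h, abs_of_nonpos (by omega : x2 - x1 ≤ 0)]; ring
  have hy2 : y2 = y1 + sy * dy := by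
    rw [hsydef, hdydef]
    by_cases h : y1 < y2
    · rw [if_pos h, abs_of_nonneg (by omega : (0:Int) ≤ y2 - y1)]; ring
    · rw [if_neg h, abs_of_nonpos (by omega : y2 - y1 ≤ 0)]; ring
  by_cases hcase : dy ≤ dx
  · -- driving axis x
    have hmax : max dx dy = dx := max_eq_left hcase
    simp only [ge_iff_le, if_pos hcase, hmax]
    by_cases hdxpos : 0 < dx
    · have h0 : PySem.Int.floordiv (2 * 0 * dy + dx - 1) (2 * dx) = 0 :=
        pvFd_zero dx dy hdxpos
      have hA := pvLoopA_dx x1 y1 dx dy sx sy (PySem.List.pyRange 1 (t + 1) 1)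
        hdxpos hdy0 hcase hsx ((dx + dy).toNat + 1) 0 le_rfl hdx0 (by omega) []
      rw [h0] at hA
      simp only [mul_zero, add_zero, zero_mul, sub_zero, List.nil_append] at hA
      rw [hx2, hy2, hA]
      rw [pvFoldB_eq' (PySem.List.pyRange 1 (t + 1) 1)
        (fun k => x1 + sx * k)
        (fun k => y1 + sy * PySem.Int.floordiv (2 * k * dy + dx - 1) (2 * dx))
        (PySem.List.pyRange 0 dx 1) []]
      simp
    · -- dx = 0, hence dy = 0: the line is a single point, both sides empty
      have hdxz : dx = 0 := by omega
      have hdyz : dy = 0 := by omega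
      have hxe : x1 = x2 := by
        have h : |x2 - x1| = 0 := by rw [← hdxdef]; exact hdxz
        have := abs_eq_zero.mp h; omega
      have hye : y1 = y2 := by
        have h : |y2 - y1| = 0 := by rw [← hdydef]; exact hdyz
        have := abs_eq_zero.mp h; omega
      subst hxe; subst hye
      rw [hdxz, hdyz]
      simp [pvLoopA, PySem.List.pyRange_one_eq_nil (le_refl (0:Int))]
  · -- driving axis y
    push_neg at hcase
    have hmax : max dx dy = dy := max_eq_right (le_of_lt hcase)
    simp only [ge_iff_le, if_neg (not_le.mpr hcase), hmax]
    have hdypos : 0 < dy := by omega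
    have h0 : PySem.Int.floordiv (2 * 0 * dx + dy - 1) (2 * dy) = 0 :=
      pvFd_zero dy dx hdypos
    have hA := pvLoopA_dy x1 y1 dx dy sx sy (PySem.List.pyRange 1 (t + 1) 1)
      hdypos hdx0 hcase hsy ((dx + dy).toNat + 1) 0 le_rfl hdy0 (by omega) []
    rw [h0] at hA
    simp only [mul_zero, add_zero, zero_mul, sub_zero, List.nil_append] at hA
    rw [hx2, hy2, hA]
    rw [pvFoldB_eq' (PySem.List.pyRange 1 (t + 1) 1)
      (fun k => x1 + sx * PySem.Int.floordiv (2 * k * dx + dy - 1) (2 * dy))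
      (fun k => y1 + sy * k)
      (PySem.List.pyRange 0 dy 1) []]
    simp
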